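-- pv_equiv track=rewrite | github.com/adam147g/algorithms-and-data-structures | Laboratory/Graph/Good start.py | good_start
-- ===== SOURCE A (Python) =====
-- from math import inf
--
-- def dfs(graph, visited, time_visit, source, time):
--     visited[source] = True
--     for v in graph[source]:
--         if not visited[v]:
--             dfs(graph, visited, time_visit, v, time)
--     time[0] += 1
--     time_visit[source] = time[0]
--
-- def dfs_check(graph, visited, source):
--     visited[source] = True
--     for v in graph[source]:
--         if not visited[v]:
--             dfs_check(graph, visited, v)
--
-- def good_start(graph):
--     visited = [False] * len(graph)
--     time_visit = [inf] * len(graph)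
--     time = [0]
--     time_visit[0] = 0
--     for i in range(len(graph)):
--         if not visited[i]:
--             dfs(graph, visited, time_visit, i, time)
--     for i in range(len(graph)):
--         visited[i] = False
--     for i in range(len(time_visit)):
--         if time_visit[i] == len(time_visit):
--             dfs_check(graph, visited, i)
--             for j in range(len(time_visit)):
--                 if not visited[j]:
--                     return False
--             return True
-- ===== SOURCE B (Python) =====
-- # Iterative re-implementation: one explicit-stack post-order DFS helper used for both
-- # passes; the candidate root is the last vertex in the global finish order.
-- # Returns None on the empty graph (where the original raises IndexError).
--
-- def _idfs(graph, visited, start, order):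
--     """Mark-on-push iterative DFS from `start`; appends vertices to `order` in
--     post-order (finish order), identical to the recursive traversal."""
--     visited[start] = True
--     stack = [(start, 0)]
--     while stack:
--         u, j = stack[-1]
--         if j < len(graph[u]):
--             stack[-1] = (u, j + 1)
--             v = graph[u][j]
--             if not visited[v]:
--                 visited[v] = True
--                 stack.append((v, 0))
--         else:
--             stack.pop()
--             order.append(u)
--
-- def good_start(graph):
--     n = len(graph)
--     if n == 0:
--         return None
--     visited = [False] * n
--     order = []
--     for i in range(n):
--         if not visited[i]:
--             _idfs(graph, visited, i, order)
--     root = order[-1]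
--     seen = [False] * n
--     _idfs(graph, seen, root, [])
--     return all(seen)
-- ===== Notes on version B (the rewrite author's own statement) =====
-- stated objective: alternative
-- what changed: The two recursive DFS helpers (finish-time counter plus a scan for the vertex with finish time n) are replaced by one explicit-stack iterative post-order DFS helper used for both passes; the candidate root is simply the last vertex of the global finish-order list, and reachability is re-checked with the same iterative helper.
import Mathlib
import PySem

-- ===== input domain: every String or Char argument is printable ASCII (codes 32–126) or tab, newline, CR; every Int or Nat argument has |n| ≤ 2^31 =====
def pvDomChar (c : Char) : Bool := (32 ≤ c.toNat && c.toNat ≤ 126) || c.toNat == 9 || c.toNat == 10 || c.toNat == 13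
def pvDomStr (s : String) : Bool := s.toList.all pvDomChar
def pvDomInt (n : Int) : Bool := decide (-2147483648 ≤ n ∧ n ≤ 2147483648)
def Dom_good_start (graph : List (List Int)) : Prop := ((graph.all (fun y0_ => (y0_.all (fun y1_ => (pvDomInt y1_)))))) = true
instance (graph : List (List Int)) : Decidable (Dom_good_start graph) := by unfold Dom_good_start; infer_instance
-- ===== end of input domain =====

-- B replaces the two recursive DFS helpers by one explicit-stack iterative post-order
-- DFS used for both passes (candidate root = last vertex of the finish order); same
-- asymptotic cost. Equivalence is about return values (A mutates no caller data
-- observably beyond its argument being read).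

-- ===== PORT A =====

-- graph[u]: inside Pre_ every accessed index is in range, getD is exact there
def gsNbrs (g : List (List Int)) (u : Nat) : List Int := g.getD u []

-- Python's list index for -n ≤ w < n (negative indices wrap around); exact on Pre_
def gsIdx (n : Nat) (w : Int) : Nat := (if w < 0 then w + n else w).toNat

-- dfs(graph, visited, time_visit, source, time): fuel (first Nat argument) is a
-- totality guard only; it never runs out on inputs admitted by Pre_good_start
mutual
def gsDfsA (g : List (List Int)) : Nat → Nat → List Bool × List Int × Int → Option (List Bool × List Int × Int)
  | 0, _, _ => none
  | f+1, src, (vis, tv, t) =>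
    match gsDfsALoop g f (gsNbrs g src) (vis.set src true, tv, t) with
    | none => none
    | some (vis', tv', t') => some (vis', tv'.set src (t'+1), t'+1)
termination_by f _ _ => (f, 0)
def gsDfsALoop (g : List (List Int)) : Nat → List Int → List Bool × List Int × Int → Option (List Bool × List Int × Int)
  | _, [], st => some st
  | f, v::vs, (vis, tv, t) =>
    if vis.getD (gsIdx g.length v) false then gsDfsALoop g f vs (vis, tv, t)
    else match gsDfsA g f (gsIdx g.length v) (vis, tv, t) with
      | none => none
      | some st => gsDfsALoop g f vs st
termination_by f l _ => (f, l.length + 1)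
end

-- dfs_check(graph, visited, source)
mutual
def gsDfsCheck (g : List (List Int)) : Nat → Nat → List Bool → Option (List Bool)
  | 0, _, _ => none
  | f+1, src, vis => gsDfsCheckLoop g f (gsNbrs g src) (vis.set src true)
termination_by f _ _ => (f, 0)
def gsDfsCheckLoop (g : List (List Int)) : Nat → List Int → List Bool → Option (List Bool)
  | _, [], vis => some vis
  | f, v::vs, vis =>
    if vis.getD (gsIdx g.length v) false then gsDfsCheckLoop g f vs vis
    else match gsDfsCheck g f (gsIdx g.length v) vis with
      | none => none
      | some vis' => gsDfsCheckLoop g f vs vis'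
termination_by f l _ => (f, l.length + 1)
end

-- "for j in range(len(time_visit)): if not visited[j]: return False / return True"
def gsAllVisited : List Nat → List Bool → Bool
  | [], _ => true
  | j::js, vis => if vis.getD j false then gsAllVisited js vis else false

-- the final "for i in range(len(time_visit)): if time_visit[i] == len(time_visit): …"
def gsFinalScan (g : List (List Int)) (tv : List Int) (vis0 : List Bool) : List Nat → Option Bool
  | [] => none
  | i :: is =>
    if tv.getD i 0 = (tv.length : Int) then
      match gsDfsCheck g (g.length + 1) i vis0 with
      | none => none
      | some visC => some (gsAllVisited (List.range tv.length) visC)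
    else gsFinalScan g tv vis0 is

def good_start (graph : List (List Int)) : Option Bool :=
  let n := graph.length
  -- math.inf is only a sentinel: the first pass overwrites every cell before any read,
  -- so it is modeled by the Int sentinel -1.  time_visit[0] = 0 raises IndexError on
  -- the empty graph (excluded by Pre_good_start); List.set is a harmless no-op there.
  let tv0 : List Int := (List.replicate n (-1 : Int)).set 0 0
  match (List.range n).foldl
      (fun ost i => ost.bind (fun st =>
        if st.1.getD i false then some st else gsDfsA graph (n + 1) i st))
      (some (List.replicate n false, tv0, (0 : Int))) with
  | none => none
  | some (vis1, tv1, _) =>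
    let vis2 := (List.range n).foldl (fun v i => v.set i false) vis1
    gsFinalScan graph tv1 vis2 (List.range n)

-- ===== PORT B =====

-- max row length and an upper bound on the number of while-loop iterations: the
-- fuel is a totality guard for the while loop, never exhausted inside Pre_good_start
def gsDmax (g : List (List Int)) : Nat := (g.map List.length).foldr max 0
def gsFuelB (g : List (List Int)) : Nat := (g.length + 1) * (gsDmax g + 2) + 1

-- the while loop of _idfs; the Python stack's top (stack[-1]) is the list head here
def gsRunB (g : List (List Int)) : Nat → List (Nat × Nat) → List Bool → List Nat → Option (List Bool × List Nat)
  | _, [], vis, ord => some (vis, ord)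
  | 0, _::_, _, _ => none
  | f+1, (u,j)::rest, vis, ord =>
    let row := gsNbrs g u
    if j < row.length then
      let v := (gsIdx g.length (row.getD j 0))
      if vis.getD v false then gsRunB g f ((u, j+1)::rest) vis ord
      else gsRunB g f ((v,0)::(u, j+1)::rest) (vis.set v true) ord
    else gsRunB g f rest vis (ord ++ [u])

-- _idfs(graph, visited, start, order)
def gsIdfs (g : List (List Int)) (vis : List Bool) (start : Nat) (ord : List Nat) : Option (List Bool × List Nat) :=
  gsRunB g (gsFuelB g) [(start, 0)] (vis.set start true) ord

def good_start_alt (graph : List (List Int)) : Option Bool :=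
  let n := graph.length
  if n = 0 then none
  else
    match (List.range n).foldl
        (fun ost i => ost.bind (fun (st : List Bool × List Nat) =>
          if st.1.getD i false then some st else gsIdfs graph st.1 i st.2))
        (some (List.replicate n false, ([] : List Nat))) with
    | none => none
    | some (_, ord) =>
      match ord.getLast? with      -- order[-1]; raises only on [], unreachable for n > 0
      | none => none
      | some root =>
        match gsIdfs graph (List.replicate n false) root [] with
        | none => none
        | some (seen, _) => some (seen.all id)

-- ===== PRECONDITION & SPEC =====

-- Pre_ excludes exactly the inputs on which A raises IndexError: the empty graph
-- (time_visit[0] = 0 on an empty list) and graphs with an adjacency entry outside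
-- [-n, n) (Python list indexing; negative entries wrap around and are admitted).
def Pre_good_start (graph : List (List Int)) : Prop :=
  graph ≠ [] ∧ ∀ row ∈ graph, ∀ v ∈ row, -(graph.length : Int) ≤ v ∧ v < (graph.length : Int)
instance (graph : List (List Int)) : Decidable (Pre_good_start graph) := by
  unfold Pre_good_start; infer_instance

def pvWitness_good_start : List (List Int) := [[1], [0]]

def Spec_good_start (graph : List (List Int)) (out : Option Bool) : Prop := out = good_start_alt graph
instance (graph : List (List Int)) (out : Option Bool) : Decidable (Spec_good_start graph out) := by
  unfold Spec_good_start; infer_instance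

-- ===== CLAIM (what is proved, stated in full; the proofs are below) =====
def Claim_equal_good_start : Prop := ∀ (graph : List (List Int)), Dom_good_start graph → Pre_good_start graph → Spec_good_start graph (good_start graph)

-- ===== LEMMAS AND PROOFS =====

-- entries of every row are in-range vertex indices
def gsValid (g : List (List Int)) : Prop :=
  ∀ row ∈ g, ∀ v ∈ row, -(g.length : Int) ≤ v ∧ v < (g.length : Int)

-- number of unvisited vertices
def gsCF (vis : List Bool) : Nat := vis.count false

-- fueled pure recursive DFS spec: runs the neighbour loop of an already-marked
-- vertex, appending each vertex to the post-order list when it finishes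
def gsLoopF (g : List (List Int)) : Nat → List Int → List Bool × List Nat → Option (List Bool × List Nat)
  | _, [], st => some st
  | 0, v::js, (vis, ord) =>
    if vis.getD (gsIdx g.length v) false then gsLoopF g 0 js (vis, ord) else none
  | f+1, v::js, (vis, ord) =>
    if vis.getD (gsIdx g.length v) false then gsLoopF g (f+1) js (vis, ord)
    else
      match gsLoopF g f (gsNbrs g (gsIdx g.length v)) (vis.set (gsIdx g.length v) true, ord) with
      | none => none
      | some (vis', ord') => gsLoopF g (f+1) js (vis', ord' ++ [(gsIdx g.length v)])
termination_by f js _ => (f, js.length)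

-- total version at the canonical, always-sufficient fuel
def gsD (g : List (List Int)) (js : List Int) (st : List Bool × List Nat) : List Bool × List Nat :=
  (gsLoopF g (gsCF st.1) js st).getD st

-- one step of the phase-1 loop "for i in range(n): if not visited[i]: dfs(i)"
def gsVisit1 (g : List (List Int)) (st : List Bool × List Nat) (i : Nat) : List Bool × List Nat :=
  if st.1.getD i false then st
  else
    let st' := gsD g (gsNbrs g i) (st.1.set i true, st.2)
    (st'.1, st'.2 ++ [i])

def gsP1 (g : List (List Int)) : List Bool × List Nat :=
  (List.range g.length).foldl (gsVisit1 g) (List.replicate g.length false, [])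

-- A's time bookkeeping: write finish times t+1, t+2, … to the listed vertices
def gsWriteT : List Int → Int → List Nat → List Int
  | tv, _, [] => tv
  | tv, t, x::l => gsWriteT (tv.set x (t+1)) (t+1) l

-- what the machine computes: finish each suspended frame in turn
def gsStepAll (g : List (List Int)) : List (Nat × Nat) → List Bool × List Nat → List Bool × List Nat
  | [], st => st
  | (u,j)::rest, st =>
    let st' := gsD g ((gsNbrs g u).drop j) st
    gsStepAll g rest (st'.1, st'.2 ++ [u])

-- termination measure of the while loop
def gsMu (g : List (List Int)) (frames : List (Nat × Nat)) (vis : List Bool) : Nat :=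
  (frames.map (fun p => (gsNbrs g p.1).length + 1 - p.2)).sum + gsCF vis * (gsDmax g + 2)

theorem gsCF_le_length (vis : List Bool) : gsCF vis ≤ vis.length :=
  List.count_le_length

theorem gsCF_pos (vis : List Bool) (x : Nat) (hx : x < vis.length)
    (h : vis.getD x false = false) : 0 < gsCF vis := by
  rw [List.getD_eq_getElem vis false hx] at h
  exact List.count_pos_iff.2 (h ▸ vis.getElem_mem hx)

theorem gsCF_set_true (vis : List Bool) (x : Nat) (hx : x < vis.length)
    (h : vis.getD x false = false) : gsCF (vis.set x true) + 1 = gsCF vis := by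
  unfold gsCF
  induction vis generalizing x with
  | nil => simp at hx
  | cons b tl ih =>
    cases x with
    | zero => simp_all [List.getD]
    | succ x =>
      simp only [List.length_cons, Nat.succ_lt_succ_iff] at hx
      simp only [List.getD_cons_succ] at h
      cases b <;> simp_all [List.set]

theorem gsGetD_set (vis : List Bool) (x y : Nat) (hx : x < vis.length) :
    (vis.set x true).getD y false = (vis.getD y false || decide (y = x)) := by
  rcases eq_or_ne y x with rfl | hne
  · simp [List.getD, hx]
  · rw [List.getD, List.getD, List.getElem?_set_ne (Ne.symm hne)]
    simp [hne]

theorem gsValid_nbrs (g : List (List Int)) (hg : gsValid g) (u : Nat) :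
    ∀ v ∈ gsNbrs g u, (gsIdx g.length v) < g.length := by
  intro v hv
  unfold gsNbrs at hv
  by_cases hu : u < g.length
  · rw [List.getD_eq_getElem g [] hu] at hv
    have h := hg _ (g.getElem_mem hu) v hv
    unfold gsIdx
    split_ifs <;> omega
  · rw [List.getD_eq_default _ _ (Nat.le_of_not_lt hu)] at hv
    simp at hv

theorem gsNbrs_len_le (g : List (List Int)) (u : Nat) :
    (gsNbrs g u).length ≤ gsDmax g := by
  unfold gsNbrs gsDmax
  by_cases hu : u < g.length
  · rw [List.getD_eq_getElem g [] hu]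
    have hm : (g[u]).length ∈ g.map List.length := List.mem_map_of_mem (g.getElem_mem hu)
    revert hm
    generalize g.map List.length = l
    intro hm
    induction l with
    | nil => simp at hm
    | cons a l ih =>
      rcases List.mem_cons.1 hm with rfl | hm
      · exact le_max_of_le_left (le_refl _)
      · exact le_max_of_le_right (ih hm)
  · rw [List.getD_eq_default _ _ (Nat.le_of_not_lt hu)]
    simp

theorem gsLoopF_shape (g : List (List Int)) (hg : gsValid g) :
    ∀ f (js : List Int) (vis : List Bool) (ord : List Nat) vis' ord',
    (∀ v ∈ js, (gsIdx g.length v) < g.length) → vis.length = g.length →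
    gsLoopF g f js (vis, ord) = some (vis', ord') →
    vis'.length = vis.length ∧
    ∃ l, ord' = ord ++ l ∧ l.Nodup ∧ gsCF vis' + l.length = gsCF vis ∧
      (∀ x ∈ l, vis.getD x false = false ∧ x < g.length) ∧
      (∀ x, vis'.getD x false = (vis.getD x false || decide (x ∈ l))) := by
  intro f
  induction f using Nat.strongRecOn with
  | ind f ihf =>
  intro js
  induction js with
  | nil =>
    intro vis ord vis' ord' hjs hlen heq
    cases f <;> simp only [gsLoopF, Option.some.injEq, Prod.mk.injEq] at heq <;>
      obtain ⟨rfl, rfl⟩ := heq <;> exact ⟨rfl, [], by simp⟩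
  | cons v js ihjs =>
    intro vis ord vis' ord' hjs hlen heq
    have hv_range : (gsIdx g.length v) < g.length := hjs v (List.mem_cons_self)
    have hjs' : ∀ w ∈ js, (gsIdx g.length w) < g.length := fun w hw => hjs w (List.mem_cons_of_mem _ hw)
    cases f with
    | zero =>
      by_cases hv : vis.getD (gsIdx g.length v) false = true
      · rw [gsLoopF, if_pos hv] at heq
        exact ihjs vis ord vis' ord' hjs' hlen heq
      · rw [gsLoopF, if_neg hv] at heq
        exact absurd heq (by simp)
    | succ f' =>
      by_cases hv : vis.getD (gsIdx g.length v) false = true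
      · rw [gsLoopF, if_pos hv] at heq
        exact ihjs vis ord vis' ord' hjs' hlen heq
      · rw [gsLoopF, if_neg hv] at heq
        rcases hin : gsLoopF g f' (gsNbrs g (gsIdx g.length v)) (vis.set (gsIdx g.length v) true, ord) with _ | ⟨vis₁, ord₁⟩
        · rw [hin] at heq; exact absurd heq (by simp)
        rw [hin] at heq
        have hv' : vis.getD (gsIdx g.length v) false = false := by simpa using hv
        have hlen₁ : (vis.set (gsIdx g.length v) true).length = g.length := by simpa using hlen
        obtain ⟨hL1, l₁, hord₁, hnd₁, hcf₁, hmem₁, hpt₁⟩ :=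
          ihf f' (Nat.lt_succ_self f') (gsNbrs g (gsIdx g.length v)) (vis.set (gsIdx g.length v) true) ord vis₁ ord₁
            (gsValid_nbrs g hg (gsIdx g.length v)) hlen₁ hin
        have hlen₂ : vis₁.length = g.length := by rw [hL1]; exact hlen₁
        obtain ⟨hL2, l₂, hord₂, hnd₂, hcf₂, hmem₂, hpt₂⟩ :=
          ihjs vis₁ (ord₁ ++ [(gsIdx g.length v)]) vis' ord' hjs' hlen₂ heq
        have hsetD : ∀ x, (vis.set (gsIdx g.length v) true).getD x false
            = (vis.getD x false || decide (x = (gsIdx g.length v))) := fun x =>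
          gsGetD_set vis (gsIdx g.length v) x (hlen ▸ hv_range)
        -- facts feeding disjointness / membership
        have hmem₁' : ∀ x ∈ l₁, vis.getD x false = false ∧ x < g.length := by
          intro x hx
          obtain ⟨hxf, hxl⟩ := hmem₁ x hx
          rw [hsetD x] at hxf
          simp only [Bool.or_eq_false_iff] at hxf
          exact ⟨hxf.1, hxl⟩
        have hvn₁ : (gsIdx g.length v) ∉ l₁ := by
          intro hx
          have := (hmem₁ _ hx).1
          rw [hsetD] at this; simp at this
        have hvis₁_vn : vis₁.getD (gsIdx g.length v) false = true := by
          rw [hpt₁ (gsIdx g.length v), hsetD]; simp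
        have hmem₂' : ∀ x ∈ l₂, vis.getD x false = false ∧ x ∉ l₁ ∧ x ≠ (gsIdx g.length v) ∧ x < g.length := by
          intro x hx
          obtain ⟨hxf, hxl⟩ := hmem₂ x hx
          rw [hpt₁ x, hsetD x] at hxf
          simp only [Bool.or_eq_false_iff, decide_eq_false_iff_not] at hxf
          exact ⟨hxf.1.1, hxf.2, hxf.1.2, hxl⟩
        have hvn₂ : (gsIdx g.length v) ∉ l₂ := by
          intro hx
          have := (hmem₂ _ hx).1
          rw [hvis₁_vn] at this; exact absurd this (by simp)
        refine ⟨by rw [hL2, hL1]; simp, l₁ ++ (gsIdx g.length v) :: l₂, ?_, ?_, ?_, ?_, ?_⟩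
        · rw [hord₂, hord₁]; simp
        · rw [List.nodup_append]
          refine ⟨hnd₁, ?_, ?_⟩
          · exact List.nodup_cons.2 ⟨hvn₂, hnd₂⟩
          · intro x hx₁ y hy hxy
            rcases List.mem_cons.1 hy with rfl | hy
            · exact hvn₁ (hxy ▸ hx₁)
            · exact (hmem₂' y hy).2.1 (hxy ▸ hx₁)
        · have h1 : gsCF (vis.set (gsIdx g.length v) true) + 1 = gsCF vis :=
            gsCF_set_true vis (gsIdx g.length v) (hlen ▸ hv_range) hv'
          simp only [List.length_append, List.length_cons]
          omega
        · intro x hx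
          rcases List.mem_append.1 hx with hx | hx
          · exact hmem₁' x hx
          · rcases List.mem_cons.1 hx with rfl | hx
            · exact ⟨hv', hv_range⟩
            · exact ⟨(hmem₂' x hx).1, (hmem₂' x hx).2.2.2⟩
        · intro x
          rw [hpt₂ x, hpt₁ x, hsetD x]
          by_cases h1 : x ∈ l₁ <;> by_cases h2 : x ∈ l₂ <;> by_cases h3 : x = (gsIdx g.length v) <;>
            simp [h1, h2, h3]

theorem gsLoopF_mono (g : List (List Int)) :
    ∀ f' f (js : List Int) st r, f ≤ f' →
    gsLoopF g f js st = some r → gsLoopF g f' js st = some r := by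
  intro f'
  induction f' using Nat.strongRecOn with
  | ind f' ihf' =>
  intro f js
  induction js generalizing f with
  | nil =>
    intro st r hle heq
    cases f <;> cases f' <;> simpa [gsLoopF] using heq
  | cons v js ihjs =>
    intro st r hle heq
    obtain ⟨vis, ord⟩ := st
    by_cases hv : vis.getD (gsIdx g.length v) false = true
    · have heq' : gsLoopF g f js (vis, ord) = some r := by
        cases f <;> rwa [gsLoopF, if_pos hv] at heq
      have : gsLoopF g f' js (vis, ord) = some r := ihjs f _ _ hle heq'
      cases f' <;> rwa [gsLoopF, if_pos hv]
    · cases f with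
      | zero => rw [gsLoopF, if_neg hv] at heq; exact absurd heq (by simp)
      | succ f₀ =>
        cases f' with
        | zero => omega
        | succ f₁ =>
          rw [gsLoopF, if_neg hv] at heq
          rcases hin : gsLoopF g f₀ (gsNbrs g (gsIdx g.length v)) (vis.set (gsIdx g.length v) true, ord) with _ | ⟨vis₁, ord₁⟩
          · rw [hin] at heq; exact absurd heq (by simp)
          rw [hin] at heq
          have hin' : gsLoopF g f₁ (gsNbrs g (gsIdx g.length v)) (vis.set (gsIdx g.length v) true, ord) = some (vis₁, ord₁) :=
            ihf' f₁ (Nat.lt_succ_self f₁) f₀ _ _ _ (by omega) hin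
          rw [gsLoopF, if_neg hv, hin']
          exact ihjs (f₀+1) _ _ (by omega) heq

theorem gsLoopF_suff (g : List (List Int)) (hg : gsValid g) :
    ∀ f (js : List Int) (vis : List Bool) (ord : List Nat),
    (∀ v ∈ js, (gsIdx g.length v) < g.length) → vis.length = g.length →
    gsCF vis ≤ f → (gsLoopF g f js (vis, ord)).isSome := by
  intro f
  induction f using Nat.strongRecOn with
  | ind f ihf =>
  intro js
  induction js generalizing f with
  | nil =>
    intro vis ord _ _ _
    cases f <;> simp [gsLoopF]
  | cons v js ihjs =>
    intro vis ord hjs hlen hf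
    have hv_range : (gsIdx g.length v) < g.length := hjs v (List.mem_cons_self)
    have hjs' : ∀ w ∈ js, (gsIdx g.length w) < g.length := fun w hw => hjs w (List.mem_cons_of_mem _ hw)
    by_cases hv : vis.getD (gsIdx g.length v) false = true
    · have := ihjs f ihf vis ord hjs' hlen hf
      cases f <;> rwa [gsLoopF, if_pos hv]
    · have hv' : vis.getD (gsIdx g.length v) false = false := by simpa using hv
      have hpos : 0 < gsCF vis := gsCF_pos vis (gsIdx g.length v) (hlen ▸ hv_range) hv'
      cases f with
      | zero => omega
      | succ f₀ =>
        rw [gsLoopF, if_neg hv]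
        have hcfset : gsCF (vis.set (gsIdx g.length v) true) + 1 = gsCF vis :=
          gsCF_set_true vis (gsIdx g.length v) (hlen ▸ hv_range) hv'
        have hlen₁ : (vis.set (gsIdx g.length v) true).length = g.length := by simpa using hlen
        have hsub := ihf f₀ (Nat.lt_succ_self f₀) (gsNbrs g (gsIdx g.length v)) (vis.set (gsIdx g.length v) true) ord
          (gsValid_nbrs g hg (gsIdx g.length v)) hlen₁ (by omega)
        rcases Option.isSome_iff_exists.1 hsub with ⟨⟨vis₁, ord₁⟩, hin⟩
        rw [hin]
        obtain ⟨hL1, l₁, _, _, hcf₁, _, _⟩ :=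
          gsLoopF_shape g hg f₀ _ _ _ _ _ (gsValid_nbrs g hg (gsIdx g.length v)) hlen₁ hin
        exact ihjs (f₀+1) ihf vis₁ (ord₁ ++ [(gsIdx g.length v)]) hjs' (by rw [hL1]; exact hlen₁) (by omega)

theorem gsLoopF_canon (g : List (List Int)) (hg : gsValid g)
    (f : Nat) (js : List Int) (vis : List Bool) (ord : List Nat)
    (hjs : ∀ v ∈ js, (gsIdx g.length v) < g.length) (hlen : vis.length = g.length)
    (hf : gsCF vis ≤ f) :
    gsLoopF g f js (vis, ord) = some (gsD g js (vis, ord)) := by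
  have h := gsLoopF_suff g hg (gsCF vis) js vis ord hjs hlen (le_refl _)
  rcases Option.isSome_iff_exists.1 h with ⟨r, hr⟩
  have : gsD g js (vis, ord) = r := by unfold gsD; rw [hr]; rfl
  rw [this]
  exact gsLoopF_mono g f (gsCF vis) js (vis, ord) r hf hr

theorem gsD_nil (g : List (List Int)) (st : List Bool × List Nat) : gsD g [] st = st := by
  unfold gsD
  cases h : gsCF st.1 <;> simp [gsLoopF]

theorem gsD_cons_visited (g : List (List Int)) (v : Int) (js : List Int)
    (vis : List Bool) (ord : List Nat) (h : vis.getD (gsIdx g.length v) false = true) :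
    gsD g (v::js) (vis, ord) = gsD g js (vis, ord) := by
  unfold gsD
  have : gsLoopF g (gsCF (vis, ord).1) (v::js) (vis, ord) = gsLoopF g (gsCF (vis, ord).1) js (vis, ord) := by
    cases hc : gsCF (vis, ord).1 <;> rw [gsLoopF, if_pos h]
  rw [this]

theorem gsD_cons_unvisited (g : List (List Int)) (hg : gsValid g) (v : Int) (js : List Int)
    (vis : List Bool) (ord : List Nat)
    (hjs : ∀ w ∈ v::js, (gsIdx g.length w) < g.length) (hlen : vis.length = g.length)
    (h : vis.getD (gsIdx g.length v) false = false) :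
    gsD g (v::js) (vis, ord) =
      gsD g js ((gsD g (gsNbrs g (gsIdx g.length v)) (vis.set (gsIdx g.length v) true, ord)).1,
                (gsD g (gsNbrs g (gsIdx g.length v)) (vis.set (gsIdx g.length v) true, ord)).2 ++ [(gsIdx g.length v)]) := by
  have hv_range : (gsIdx g.length v) < g.length := hjs v (List.mem_cons_self)
  have hjs' : ∀ w ∈ js, (gsIdx g.length w) < g.length := fun w hw => hjs w (List.mem_cons_of_mem _ hw)
  have hlen₁ : (vis.set (gsIdx g.length v) true).length = g.length := by simpa using hlen
  have hcfset : gsCF (vis.set (gsIdx g.length v) true) + 1 = gsCF vis :=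
    gsCF_set_true vis (gsIdx g.length v) (hlen ▸ hv_range) h
  rcases hD : gsD g (gsNbrs g (gsIdx g.length v)) (vis.set (gsIdx g.length v) true, ord) with ⟨vis₁, ord₁⟩
  have hin : gsLoopF g (gsCF (vis.set (gsIdx g.length v) true)) (gsNbrs g (gsIdx g.length v)) (vis.set (gsIdx g.length v) true, ord)
      = some (vis₁, ord₁) := by
    rw [gsLoopF_canon g hg _ _ _ _ (gsValid_nbrs g hg _) hlen₁ (le_refl _), hD]
  obtain ⟨hL1, l₁, hord₁, _, hcf₁, _, _⟩ :=
    gsLoopF_shape g hg _ _ _ _ _ _ (gsValid_nbrs g hg (gsIdx g.length v)) hlen₁ hin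
  obtain ⟨c', hc⟩ : ∃ c', gsCF vis = c' + 1 := ⟨gsCF (vis.set (gsIdx g.length v) true), by omega⟩
  have hceq : gsCF (vis.set (gsIdx g.length v) true) = c' := by omega
  have hlhs : gsLoopF g (gsCF vis) (v::js) (vis, ord)
      = gsLoopF g (c'+1) js (vis₁, ord₁ ++ [(gsIdx g.length v)]) := by
    rw [hc, gsLoopF, if_neg (by simpa using h)]
    rw [← hceq, hin]
  have hfin : gsLoopF g (c'+1) js (vis₁, ord₁ ++ [(gsIdx g.length v)])
      = some (gsD g js (vis₁, ord₁ ++ [(gsIdx g.length v)])) := by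
    apply gsLoopF_canon g hg _ _ _ _ hjs' (by rw [hL1]; exact hlen₁)
    omega
  show (gsLoopF g (gsCF (vis, ord).1) (v::js) (vis, ord)).getD (vis, ord) = _
  rw [show gsCF (vis, ord).1 = gsCF vis from rfl, hlhs, hfin]
  rfl

theorem gsWriteT_append (tv : List Int) (t : Int) (a b : List Nat) :
    gsWriteT tv t (a ++ b) = gsWriteT (gsWriteT tv t a) (t + a.length) b := by
  induction a generalizing tv t with
  | nil => simp [gsWriteT]
  | cons x a ih =>
    simp only [List.cons_append, gsWriteT, List.length_cons]
    rw [ih]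
    congr 1
    push_cast
    ring

theorem gsWriteT_length (tv : List Int) (t : Int) (l : List Nat) :
    (gsWriteT tv t l).length = tv.length := by
  induction l generalizing tv t with
  | nil => rfl
  | cons x l ih => simp [gsWriteT, ih]

theorem gsWriteT_getD_not_mem (tv : List Int) (t : Int) (l : List Nat) (x : Nat)
    (h : x ∉ l) : (gsWriteT tv t l).getD x 0 = tv.getD x 0 := by
  induction l generalizing tv t with
  | nil => rfl
  | cons y l ih =>
    have hxy : x ≠ y := fun hh => h (hh ▸ List.mem_cons_self)
    rw [gsWriteT, ih _ _ (fun hh => h (List.mem_cons_of_mem _ hh))]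
    rw [List.getD, List.getD, List.getElem?_set_ne (Ne.symm hxy)]

theorem gsWriteT_getD_mem (tv : List Int) (t : Int) (l : List Nat) (x : Nat)
    (hl : l.Nodup) (hx : x ∈ l) (hlt : x < tv.length) :
    (gsWriteT tv t l).getD x 0 = t + l.idxOf x + 1 := by
  induction l generalizing tv t with
  | nil => simp at hx
  | cons y l ih =>
    rcases eq_or_ne x y with rfl | hxy
    · have hnot : x ∉ l := (List.nodup_cons.1 hl).1
      rw [gsWriteT, gsWriteT_getD_not_mem _ _ _ _ hnot]
      rw [List.getD, List.getElem?_set_self hlt]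
      simp
    · have hx' : x ∈ l := (List.mem_cons.1 hx).resolve_left hxy
      rw [gsWriteT, ih _ _ (List.nodup_cons.1 hl).2 hx' (by simpa using hlt)]
      rw [List.idxOf_cons_ne _ (Ne.symm hxy)]
      push_cast
      ring

theorem gsDfsALoop_rel (g : List (List Int)) (hg : gsValid g) :
    ∀ f (js : List Int) (vis : List Bool) (tv : List Int) (t : Int) (ord : List Nat),
    (gsDfsALoop g f js (vis, tv, t) = none ∧ gsLoopF g f js (vis, ord) = none) ∨
    (∃ vis' tv' t' l, gsDfsALoop g f js (vis, tv, t) = some (vis', tv', t') ∧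
      gsLoopF g f js (vis, ord) = some (vis', ord ++ l) ∧
      t' = t + l.length ∧ tv' = gsWriteT tv t l) := by
  intro f
  induction f using Nat.strongRecOn with
  | ind f ihf =>
  intro js
  induction js generalizing f with
  | nil =>
    intro vis tv t ord
    right
    refine ⟨vis, tv, t, [], ?_, ?_, by simp, rfl⟩
    · cases f <;> simp [gsDfsALoop]
    · cases f <;> simp [gsLoopF]
  | cons v js ihjs =>
    intro vis tv t ord
    by_cases hv : vis.getD (gsIdx g.length v) false = true
    · have hA : gsDfsALoop g f (v::js) (vis, tv, t) = gsDfsALoop g f js (vis, tv, t) := by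
        rw [gsDfsALoop, if_pos hv]
      have hB : gsLoopF g f (v::js) (vis, ord) = gsLoopF g f js (vis, ord) := by
        cases f <;> rw [gsLoopF, if_pos hv]
      rw [hA, hB]
      exact ihjs f ihf vis tv t ord
    · cases f with
      | zero =>
        left
        constructor
        · have hv2 : vis[(gsIdx g.length v)]?.getD false = false := by simpa using hv
          simp [gsDfsALoop, gsDfsA, hv2]
        · rw [gsLoopF, if_neg hv]
      | succ f₀ =>
        rcases ihf f₀ (Nat.lt_succ_self f₀) (gsNbrs g (gsIdx g.length v)) (vis.set (gsIdx g.length v) true) tv t ord with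
          ⟨hA₁, hB₁⟩ | ⟨vis₁, tv₁, t₁, l₁, hA₁, hB₁, ht₁, htv₁⟩
        · left
          constructor
          · rw [gsDfsALoop, if_neg hv, gsDfsA, hA₁]
          · rw [gsLoopF, if_neg hv, hB₁]
        · have hA : gsDfsALoop g (f₀+1) (v::js) (vis, tv, t)
              = gsDfsALoop g (f₀+1) js (vis₁, tv₁.set (gsIdx g.length v) (t₁+1), t₁+1) := by
            rw [gsDfsALoop, if_neg hv, gsDfsA, hA₁]
          have hB : gsLoopF g (f₀+1) (v::js) (vis, ord)
              = gsLoopF g (f₀+1) js (vis₁, (ord ++ l₁) ++ [(gsIdx g.length v)]) := by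
            rw [gsLoopF, if_neg hv, hB₁]
          rcases ihjs (f₀+1) ihf vis₁ (tv₁.set (gsIdx g.length v) (t₁+1)) (t₁+1) ((ord ++ l₁) ++ [(gsIdx g.length v)]) with
            ⟨hA₂, hB₂⟩ | ⟨vis₂, tv₂, t₂, l₂, hA₂, hB₂, ht₂, htv₂⟩
          · left
            exact ⟨by rw [hA, hA₂], by rw [hB, hB₂]⟩
          · right
            refine ⟨vis₂, tv₂, t₂, l₁ ++ (gsIdx g.length v) :: l₂, by rw [hA, hA₂], ?_, ?_, ?_⟩
            · rw [hB, hB₂]; simp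
            · rw [ht₂, ht₁]; simp; push_cast; ring
            · rw [htv₂, htv₁, ht₁]
              rw [show l₁ ++ (gsIdx g.length v) :: l₂ = (l₁ ++ [(gsIdx g.length v)]) ++ l₂ by simp]
              rw [gsWriteT_append, gsWriteT_append]
              simp [gsWriteT]
              push_cast
              ring_nf

theorem gsDfsCheckLoop_rel (g : List (List Int)) :
    ∀ f (js : List Int) (vis : List Bool) (ord : List Nat),
    (gsDfsCheckLoop g f js vis = none ∧ gsLoopF g f js (vis, ord) = none) ∨
    (∃ vis' l, gsDfsCheckLoop g f js vis = some vis' ∧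
      gsLoopF g f js (vis, ord) = some (vis', ord ++ l)) := by
  intro f
  induction f using Nat.strongRecOn with
  | ind f ihf =>
  intro js
  induction js generalizing f with
  | nil =>
    intro vis ord
    right
    refine ⟨vis, [], ?_, ?_⟩
    · cases f <;> simp [gsDfsCheckLoop]
    · cases f <;> simp [gsLoopF]
  | cons v js ihjs =>
    intro vis ord
    by_cases hv : vis.getD (gsIdx g.length v) false = true
    · have hA : gsDfsCheckLoop g f (v::js) vis = gsDfsCheckLoop g f js vis := by
        rw [gsDfsCheckLoop, if_pos hv]
      have hB : gsLoopF g f (v::js) (vis, ord) = gsLoopF g f js (vis, ord) := by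
        cases f <;> rw [gsLoopF, if_pos hv]
      rw [hA, hB]
      exact ihjs f ihf vis ord
    · cases f with
      | zero =>
        left
        constructor
        · have hv2 : vis[(gsIdx g.length v)]?.getD false = false := by simpa using hv
          simp [gsDfsCheckLoop, gsDfsCheck, hv2]
        · rw [gsLoopF, if_neg hv]
      | succ f₀ =>
        rcases ihf f₀ (Nat.lt_succ_self f₀) (gsNbrs g (gsIdx g.length v)) (vis.set (gsIdx g.length v) true) ord with
          ⟨hA₁, hB₁⟩ | ⟨vis₁, l₁, hA₁, hB₁⟩
        · left
          constructor
          · rw [gsDfsCheckLoop, if_neg hv, gsDfsCheck, hA₁]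
          · rw [gsLoopF, if_neg hv, hB₁]
        · have hA : gsDfsCheckLoop g (f₀+1) (v::js) vis = gsDfsCheckLoop g (f₀+1) js vis₁ := by
            rw [gsDfsCheckLoop, if_neg hv, gsDfsCheck, hA₁]
          have hB : gsLoopF g (f₀+1) (v::js) (vis, ord)
              = gsLoopF g (f₀+1) js (vis₁, (ord ++ l₁) ++ [(gsIdx g.length v)]) := by
            rw [gsLoopF, if_neg hv, hB₁]
          rcases ihjs (f₀+1) ihf vis₁ ((ord ++ l₁) ++ [(gsIdx g.length v)]) with
            ⟨hA₂, hB₂⟩ | ⟨vis₂, l₂, hA₂, hB₂⟩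
          · left
            exact ⟨by rw [hA, hA₂], by rw [hB, hB₂]⟩
          · right
            refine ⟨vis₂, l₁ ++ (gsIdx g.length v) :: l₂, by rw [hA, hA₂], ?_⟩
            rw [hB, hB₂]
            simp

theorem gsRunB_correct (g : List (List Int)) (hg : gsValid g) :
    ∀ f (frames : List (Nat × Nat)) (vis : List Bool) (ord : List Nat) out,
    (∀ p ∈ frames, p.1 < g.length) → vis.length = g.length →
    gsRunB g f frames vis ord = some out →
    out = gsStepAll g frames (vis, ord) := by
  intro f
  induction f with
  | zero =>
    intro frames vis ord out hframes hlen heq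
    cases frames with
    | nil =>
      simp only [gsRunB, Option.some.injEq] at heq
      rw [← heq]; rfl
    | cons p rest => exact absurd heq (by simp [gsRunB])
  | succ f ih =>
    intro frames vis ord out hframes hlen heq
    cases frames with
    | nil =>
      simp only [gsRunB, Option.some.injEq] at heq
      rw [← heq]; rfl
    | cons p rest =>
      obtain ⟨u, j⟩ := p
      have hu : u < g.length := hframes (u, j) (List.mem_cons_self)
      have hrest : ∀ q ∈ rest, q.1 < g.length := fun q hq => hframes q (List.mem_cons_of_mem _ hq)
      simp only [gsRunB] at heq
      by_cases hj : j < (gsNbrs g u).length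
      · rw [if_pos hj] at heq
        have he : (gsNbrs g u).getD j 0 = (gsNbrs g u)[j] := List.getD_eq_getElem _ _ hj
        have hmem : (gsNbrs g u)[j] ∈ gsNbrs g u := List.getElem_mem hj
        have hval := gsValid_nbrs g hg u _ hmem
        have hdrop : (gsNbrs g u).drop j = (gsNbrs g u)[j] :: (gsNbrs g u).drop (j+1) :=
          List.drop_eq_getElem_cons hj
        by_cases hv : vis.getD (gsIdx g.length ((gsNbrs g u).getD j 0)) false = true
        · rw [if_pos hv] at heq
          have := ih ((u, j+1)::rest) vis ord out
            (by intro q hq; rcases List.mem_cons.1 hq with rfl | hq; exact hu; exact hrest q hq)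
            hlen heq
          rw [this]
          symm
          simp only [gsStepAll, hdrop]
          rw [gsD_cons_visited g _ _ _ _ (by rwa [← he])]
        · rw [if_neg hv] at heq
          have hvlt : (gsIdx g.length ((gsNbrs g u).getD j 0)) < g.length := by rw [he]; exact hval
          have := ih ((((gsIdx g.length ((gsNbrs g u).getD j 0))), 0)::(u, j+1)::rest)
            (vis.set (gsIdx g.length ((gsNbrs g u).getD j 0)) true) ord out
            (by intro q hq
                rcases List.mem_cons.1 hq with rfl | hq
                · exact hvlt
                rcases List.mem_cons.1 hq with rfl | hq
                · exact hu
                · exact hrest q hq)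
            (by simpa using hlen) heq
          rw [this]
          symm
          have hv' : vis.getD (gsIdx g.length ((gsNbrs g u)[j])) false = false := by
            rw [← he]; simpa using hv
          have hjsval : ∀ w ∈ (gsNbrs g u)[j] :: (gsNbrs g u).drop (j+1), (gsIdx g.length w) < g.length := by
            intro w hw
            rcases List.mem_cons.1 hw with rfl | hw
            · exact hval
            · exact gsValid_nbrs g hg u w (List.mem_of_mem_drop hw)
          simp only [gsStepAll, hdrop]
          rw [gsD_cons_unvisited g hg _ _ _ _ hjsval hlen hv']
          simp only [List.drop_zero, he]
      · rw [if_neg hj] at heq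
        have := ih rest vis (ord ++ [u]) out hrest hlen heq
        rw [this]
        symm
        simp only [gsStepAll]
        rw [List.drop_eq_nil_of_le (Nat.le_of_not_lt hj), gsD_nil]

theorem gsRunB_suff (g : List (List Int)) (hg : gsValid g) :
    ∀ f (frames : List (Nat × Nat)) (vis : List Bool) (ord : List Nat),
    (∀ p ∈ frames, p.1 < g.length ∧ p.2 ≤ (gsNbrs g p.1).length) →
    vis.length = g.length → gsMu g frames vis < f →
    (gsRunB g f frames vis ord).isSome := by
  intro f
  induction f with
  | zero =>
    intro frames vis ord _ _ hmu
    exact absurd hmu (Nat.not_lt_zero _)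
  | succ f ih =>
    intro frames vis ord hframes hlen hmu
    cases frames with
    | nil => simp [gsRunB]
    | cons p rest =>
      obtain ⟨u, j⟩ := p
      have hu := hframes (u, j) (List.mem_cons_self)
      have hrest : ∀ q ∈ rest, q.1 < g.length ∧ q.2 ≤ (gsNbrs g q.1).length :=
        fun q hq => hframes q (List.mem_cons_of_mem _ hq)
      simp only [gsRunB]
      by_cases hj : j < (gsNbrs g u).length
      · rw [if_pos hj]
        have he : (gsNbrs g u).getD j 0 = (gsNbrs g u)[j] := List.getD_eq_getElem _ _ hj
        have hval := gsValid_nbrs g hg u _ (List.getElem_mem hj)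
        by_cases hv : vis.getD (gsIdx g.length ((gsNbrs g u).getD j 0)) false = true
        · rw [if_pos hv]
          apply ih
          · intro q hq
            rcases List.mem_cons.1 hq with rfl | hq
            · exact ⟨hu.1, hj⟩
            · exact hrest q hq
          · exact hlen
          · simp only [gsMu, List.map_cons, List.sum_cons] at hmu ⊢
            omega
        · rw [if_neg hv]
          have hvlt : (gsIdx g.length ((gsNbrs g u).getD j 0)) < g.length := by rw [he]; exact hval
          have hv' : vis.getD (gsIdx g.length ((gsNbrs g u).getD j 0)) false = false := by simpa using hv
          have hcf : gsCF (vis.set (gsIdx g.length ((gsNbrs g u).getD j 0)) true) + 1 = gsCF vis :=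
            gsCF_set_true _ _ (hlen ▸ hvlt) hv'
          have hdeg : (gsNbrs g ((gsIdx g.length ((gsNbrs g u).getD j 0)))).length ≤ gsDmax g :=
            gsNbrs_len_le g _
          apply ih
          · intro q hq
            rcases List.mem_cons.1 hq with rfl | hq
            · exact ⟨hvlt, Nat.zero_le _⟩
            rcases List.mem_cons.1 hq with rfl | hq
            · exact ⟨hu.1, hj⟩
            · exact hrest q hq
          · simpa using hlen
          · have hmul : gsCF (vis.set (gsIdx g.length ((gsNbrs g u).getD j 0)) true) * (gsDmax g + 2)
                + (gsDmax g + 2) = gsCF vis * (gsDmax g + 2) := by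
              rw [← hcf]; ring
            simp only [gsMu, List.map_cons, List.sum_cons] at hmu ⊢
            omega
      · rw [if_neg hj]
        apply ih rest vis (ord ++ [u]) hrest hlen
        have hju : j ≤ (gsNbrs g u).length := hu.2
        simp only [gsMu, List.map_cons, List.sum_cons] at hmu ⊢
        omega

theorem gsGetD_true_lt (vis : List Bool) (x : Nat) (h : vis.getD x false = true) :
    x < vis.length := by
  by_contra hx
  rw [List.getD, List.getElem?_eq_none (Nat.le_of_not_lt hx)] at h
  simp at h

theorem gsGetD_set_false (v : List Bool) (i x : Nat) :
    (v.set i false).getD x false = if x = i ∧ x < v.length then false else v.getD x false := by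
  rcases eq_or_ne x i with rfl | hne
  · by_cases hx : x < v.length
    · simp [List.getD, List.getElem?_set_self hx, hx]
    · rw [List.set_eq_of_length_le (Nat.le_of_not_lt hx)]
      simp [hx]
  · rw [List.getD, List.getD, List.getElem?_set_ne (Ne.symm hne)]
    simp [hne]

theorem gsResetFold (is : List Nat) (v : List Bool) :
    ((is.foldl (fun a i => a.set i false) v).length = v.length) ∧
    (∀ x, (is.foldl (fun a i => a.set i false) v).getD x false
      = if x ∈ is ∧ x < v.length then false else v.getD x false) := by
  induction is generalizing v with
  | nil => simp
  | cons i is ih =>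
    obtain ⟨ihl, ihp⟩ := ih (v.set i false)
    refine ⟨by simpa using ihl, ?_⟩
    intro x
    rw [List.foldl_cons, ihp x, gsGetD_set_false]
    simp only [List.length_set, List.mem_cons]
    by_cases h3 : x = i
    · subst h3
      by_cases h2 : x < v.length
      · by_cases h1 : x ∈ is <;> simp [h1, h2]
      · by_cases h1 : x ∈ is <;> simp [h1, h2]
    · by_cases h2 : x < v.length <;> by_cases h1 : x ∈ is <;> simp [h1, h2, h3]

theorem gsReset (v : List Bool) :
    (List.range v.length).foldl (fun a i => a.set i false) v
      = List.replicate v.length false := by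
  obtain ⟨hl, hp⟩ := gsResetFold (List.range v.length) v
  apply List.ext_getElem (by simp [hl])
  intro i h1 h2
  have := hp i
  rw [if_pos ⟨List.mem_range.2 (by omega), by omega⟩] at this
  rw [List.getD_eq_getElem _ _ h1] at this
  simp [this]

theorem gsAllVisited_eq (js : List Nat) (v : List Bool) :
    gsAllVisited js v = js.all (fun j => v.getD j false) := by
  induction js with
  | nil => rfl
  | cons j js ih =>
    rw [gsAllVisited]
    by_cases h : v.getD j false = true <;> simp [h, ih]

theorem gsAllVisited_range (v : List Bool) :
    gsAllVisited (List.range v.length) v = v.all id := by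
  rw [gsAllVisited_eq, Bool.eq_iff_iff]
  simp only [List.all_eq_true, List.mem_range]
  constructor
  · intro h x hx
    rcases List.mem_iff_getElem.1 hx with ⟨k, hk, rfl⟩
    have := h k hk
    rwa [List.getD_eq_getElem _ _ hk] at this
  · intro h j hj
    rw [List.getD_eq_getElem _ _ hj]
    exact h _ (List.getElem_mem hj)

theorem gsD_spec (g : List (List Int)) (hg : gsValid g) (js : List Int)
    (vis : List Bool) (ord : List Nat)
    (hjs : ∀ v ∈ js, (gsIdx g.length v) < g.length) (hlen : vis.length = g.length) :
    ∃ vis' l, gsD g js (vis, ord) = (vis', ord ++ l) ∧ vis'.length = vis.length ∧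
      l.Nodup ∧ gsCF vis' + l.length = gsCF vis ∧
      (∀ x ∈ l, vis.getD x false = false ∧ x < g.length) ∧
      (∀ x, vis'.getD x false = (vis.getD x false || decide (x ∈ l))) := by
  rcases hD : gsD g js (vis, ord) with ⟨vis', ord'⟩
  have hcanon : gsLoopF g (gsCF vis) js (vis, ord) = some (vis', ord') := by
    rw [gsLoopF_canon g hg _ _ _ _ hjs hlen (le_refl _), hD]
  obtain ⟨hL, l, hord, hnd, hcf, hm, hp⟩ := gsLoopF_shape g hg _ _ _ _ _ _ hjs hlen hcanon
  exact ⟨vis', l, by rw [hord], hL, hnd, hcf, hm, hp⟩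

theorem gsPhaseA (g : List (List Int)) (hg : gsValid g) :
    ∀ (is : List Nat) (vis : List Bool) (tv : List Int) (t : Int) (ord : List Nat),
    vis.length = g.length →
    ∃ V L, is.foldl (gsVisit1 g) (vis, ord) = (V, ord ++ L) ∧ V.length = vis.length ∧
      is.foldl (fun ost i => ost.bind (fun st =>
          if st.1.getD i false then some st else gsDfsA g (g.length + 1) i st))
        (some (vis, tv, t)) = some (V, gsWriteT tv t L, t + L.length) := by
  intro is
  induction is with
  | nil =>
    intro vis tv t ord hlen
    exact ⟨vis, [], by simp, rfl, by simp [gsWriteT]⟩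
  | cons i is ih =>
    intro vis tv t ord hlen
    by_cases hvi : vis.getD i false = true
    · obtain ⟨V, L, h1, h2, h3⟩ := ih vis tv t ord hlen
      refine ⟨V, L, ?_, h2, ?_⟩
      · rw [List.foldl_cons, gsVisit1, if_pos hvi]; exact h1
      · rw [List.foldl_cons]
        have hvi2 : vis[i]?.getD false = true := hvi
        simpa [Option.bind, hvi2] using h3
    · have hv' : vis.getD i false = false := by simpa using hvi
      have hlen₁ : (vis.set i true).length = g.length := by simpa using hlen
      have hnb := gsValid_nbrs g hg i
      -- the inner dfs call, relating A's state to the pure spec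
      rcases gsDfsALoop_rel g hg g.length (gsNbrs g i) (vis.set i true) tv t ord with
        ⟨hA₁, hB₁⟩ | ⟨vis₁, tv₁, t₁, l₁, hA₁, hB₁, ht₁, htv₁⟩
      · have hsuff := gsLoopF_suff g hg g.length (gsNbrs g i) (vis.set i true) ord hnb hlen₁
          (by have := gsCF_le_length (vis.set i true); omega)
        rw [hB₁] at hsuff
        simp at hsuff
      · have hD : gsD g (gsNbrs g i) (vis.set i true, ord) = (vis₁, ord ++ l₁) := by
          have hc := gsLoopF_canon g hg g.length (gsNbrs g i) (vis.set i true) ord hnb hlen₁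
            (by have := gsCF_le_length (vis.set i true); omega)
          rw [hB₁] at hc
          exact (Option.some.inj hc).symm
        have hlen₂ : vis₁.length = g.length := by
          obtain ⟨hL, _, _, _, _, _, _⟩ :=
            gsLoopF_shape g hg g.length _ _ _ _ _ hnb hlen₁ hB₁
          rw [hL]; exact hlen₁
        obtain ⟨V, L', h1, h2, h3⟩ := ih vis₁ (tv₁.set i (t₁+1)) (t₁+1) ((ord ++ l₁) ++ [i]) hlen₂
        refine ⟨V, l₁ ++ i :: L', ?_, by rw [h2, hlen₂, hlen], ?_⟩
        · rw [List.foldl_cons, gsVisit1, if_neg hvi, hD]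
          rw [h1]
          simp
        · rw [List.foldl_cons]
          have hstep : gsDfsA g (g.length + 1) i (vis, tv, t)
              = some (vis₁, tv₁.set i (t₁+1), t₁+1) := by
            rw [gsDfsA, hA₁]
          have : (some (vis, tv, t)).bind (fun st =>
              if st.1.getD i false then some st else gsDfsA g (g.length + 1) i st)
              = some (vis₁, tv₁.set i (t₁+1), t₁+1) := by
            have hv2 : vis[i]?.getD false = false := hv'
            simp [Option.bind, hv2, hstep]
          rw [this, h3]
          congr 1
          refine Prod.ext rfl (Prod.ext ?_ ?_)
          · show gsWriteT (tv₁.set i (t₁+1)) (t₁+1) L' = gsWriteT tv t (l₁ ++ i :: L')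
            rw [htv₁, ht₁]
            rw [show l₁ ++ i :: L' = (l₁ ++ [i]) ++ L' by simp]
            rw [gsWriteT_append, gsWriteT_append]
            simp [gsWriteT]
            push_cast
            ring_nf
          · show t₁ + 1 + (L'.length : Int) = t + ((l₁ ++ i :: L').length : Int)
            rw [ht₁]
            simp
            push_cast
            ring
    

theorem gsPhaseB (g : List (List Int)) (hg : gsValid g) :
    ∀ (is : List Nat) (vis : List Bool) (ord : List Nat),
    vis.length = g.length → (∀ i ∈ is, i < g.length) →
    is.foldl (fun ost i => ost.bind (fun (st : List Bool × List Nat) =>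
        if st.1.getD i false then some st else gsIdfs g st.1 i st.2)) (some (vis, ord))
      = some (is.foldl (gsVisit1 g) (vis, ord)) := by
  intro is
  induction is with
  | nil => intro vis ord _ _; rfl
  | cons i is ih =>
    intro vis ord hlen his
    have hi : i < g.length := his i (List.mem_cons_self)
    have his' : ∀ j ∈ is, j < g.length := fun j hj => his j (List.mem_cons_of_mem _ hj)
    by_cases hvi : vis.getD i false = true
    · have hvi2 : vis[i]?.getD false = true := hvi
      rw [List.foldl_cons, List.foldl_cons]
      have hs : gsVisit1 g (vis, ord) i = (vis, ord) := by rw [gsVisit1, if_pos hvi]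
      rw [hs]
      have : (some (vis, ord)).bind (fun (st : List Bool × List Nat) =>
          if st.1.getD i false then some st else gsIdfs g st.1 i st.2) = some (vis, ord) := by
        simp [Option.bind, hvi2]
      rw [this]
      exact ih vis ord hlen his'
    · have hv' : vis.getD i false = false := by simpa using hvi
      have hv2 : vis[i]?.getD false = false := hv'
      have hlen₁ : (vis.set i true).length = g.length := by simpa using hlen
      -- the iterative DFS returns and computes gsD
      have hframes : ∀ p ∈ [((i : Nat), (0 : Nat))], p.1 < g.length ∧ p.2 ≤ (gsNbrs g p.1).length := by
        intro p hp
        rcases List.mem_cons.1 hp with rfl | hp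
        · exact ⟨hi, Nat.zero_le _⟩
        · simp at hp
      have hdeg : (gsNbrs g i).length ≤ gsDmax g := gsNbrs_len_le g i
      have hcf : gsCF (vis.set i true) ≤ g.length := by
        have := gsCF_le_length (vis.set i true)
        omega
      have hmul : gsCF (vis.set i true) * (gsDmax g + 2) ≤ g.length * (gsDmax g + 2) :=
        Nat.mul_le_mul_right _ hcf
      have hexp : (g.length + 1) * (gsDmax g + 2) = g.length * (gsDmax g + 2) + (gsDmax g + 2) := by
        ring
      have hmu : gsMu g [(i, 0)] (vis.set i true) < gsFuelB g := by
        simp only [gsMu, List.map_cons, List.map_nil, List.sum_cons, List.sum_nil, gsFuelB]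
        omega
      have hsome := gsRunB_suff g hg (gsFuelB g) [(i, 0)] (vis.set i true) ord hframes hlen₁ hmu
      rcases Option.isSome_iff_exists.1 hsome with ⟨out, hout⟩
      have hcor := gsRunB_correct g hg (gsFuelB g) [(i, 0)] (vis.set i true) ord out
        (fun p hp => (hframes p hp).1) hlen₁ hout
      have hstep : gsStepAll g [(i, 0)] (vis.set i true, ord)
          = ((gsD g (gsNbrs g i) (vis.set i true, ord)).1,
             (gsD g (gsNbrs g i) (vis.set i true, ord)).2 ++ [i]) := by
        simp [gsStepAll]
      rw [List.foldl_cons, List.foldl_cons]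
      have hbind : (some (vis, ord)).bind (fun (st : List Bool × List Nat) =>
          if st.1.getD i false then some st else gsIdfs g st.1 i st.2)
          = some (gsVisit1 g (vis, ord) i) := by
        simp only [Option.bind, hv2, Bool.false_eq_true, if_false]
        rw [gsIdfs, hout, hcor, hstep]
        simp [gsVisit1, hv2]
      rw [hbind]
      obtain ⟨vis', l, hD, hlen', _, _, _, _⟩ :=
        gsD_spec g hg (gsNbrs g i) (vis.set i true) ord (gsValid_nbrs g hg i) hlen₁
      have hlenv : (gsVisit1 g (vis, ord) i).1.length = g.length := by
        rw [gsVisit1, if_neg hvi]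
        simp only [hD]
        rw [hlen']
        exact hlen₁
      rcases hV : gsVisit1 g (vis, ord) i with ⟨V1, O1⟩
      rw [hV] at hlenv
      exact ih V1 O1 hlenv his'

theorem gsP1_inv (g : List (List Int)) (hg : gsValid g) :
    ∀ (is : List Nat) (vis : List Bool) (ord : List Nat),
    vis.length = g.length → (∀ i ∈ is, i < g.length) →
    (∀ x, vis.getD x false = true ↔ x ∈ ord) → ord.Nodup →
    (is.foldl (gsVisit1 g) (vis, ord)).1.length = g.length ∧
    (∀ x, (is.foldl (gsVisit1 g) (vis, ord)).1.getD x false = true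
        ↔ x ∈ (is.foldl (gsVisit1 g) (vis, ord)).2) ∧
    (is.foldl (gsVisit1 g) (vis, ord)).2.Nodup ∧
    (∀ i ∈ is, (is.foldl (gsVisit1 g) (vis, ord)).1.getD i false = true) ∧
    (∀ x, vis.getD x false = true → (is.foldl (gsVisit1 g) (vis, ord)).1.getD x false = true) ∧
    (∃ suf, (is.foldl (gsVisit1 g) (vis, ord)).2 = ord ++ suf) := by
  intro is
  induction is with
  | nil =>
    intro vis ord hlen _ hinv hnd
    exact ⟨hlen, hinv, hnd, by simp, fun x h => h, [], by simp⟩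
  | cons i is ih =>
    intro vis ord hlen his hinv hnd
    have hi : i < g.length := his i (List.mem_cons_self)
    have his' : ∀ j ∈ is, j < g.length := fun j hj => his j (List.mem_cons_of_mem _ hj)
    by_cases hvi : vis.getD i false = true
    · have hs : gsVisit1 g (vis, ord) i = (vis, ord) := by rw [gsVisit1, if_pos hvi]
      rw [List.foldl_cons, hs]
      obtain ⟨c1, c2, c3, c4, c5, c6⟩ := ih vis ord hlen his' hinv hnd
      refine ⟨c1, c2, c3, ?_, c5, c6⟩
      intro j hj
      rcases List.mem_cons.1 hj with rfl | hj
      · exact c5 j hvi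
      · exact c4 j hj
    · have hv' : vis.getD i false = false := by simpa using hvi
      have hlen₁ : (vis.set i true).length = g.length := by simpa using hlen
      obtain ⟨vis', l, hD, hlen', hndl, hcf, hm, hp⟩ :=
        gsD_spec g hg (gsNbrs g i) (vis.set i true) ord (gsValid_nbrs g hg i) hlen₁
      have hs : gsVisit1 g (vis, ord) i = (vis', (ord ++ l) ++ [i]) := by
        rw [gsVisit1, if_neg hvi, hD]
      have hsetD : ∀ x, (vis.set i true).getD x false
          = (vis.getD x false || decide (x = i)) := fun x =>
        gsGetD_set vis i x (hlen ▸ hi)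
      have hp' : ∀ x, vis'.getD x false
          = (vis.getD x false || decide (x = i) || decide (x ∈ l)) := by
        intro x
        rw [hp x, hsetD x]
      have hlinfo : ∀ x ∈ l, vis.getD x false = false ∧ x ≠ i := by
        intro x hx
        have h1 := (hm x hx).1
        rw [hsetD x] at h1
        simp only [Bool.or_eq_false_iff, decide_eq_false_iff_not] at h1
        exact h1
      have hinv' : ∀ x, vis'.getD x false = true ↔ x ∈ (ord ++ l) ++ [i] := by
        intro x
        rw [hp' x]
        simp only [Bool.or_eq_true, decide_eq_true_eq, List.mem_append,
          List.mem_singleton, hinv x]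
        tauto
      have hnd' : ((ord ++ l) ++ [i]).Nodup := by
        rw [List.nodup_append, List.nodup_append]
        refine ⟨⟨hnd, hndl, ?_⟩, List.nodup_singleton i, ?_⟩
        · intro a ha b hb hab
          have := (hlinfo b hb).1
          rw [← hab] at this
          exact absurd ((hinv a).2 ha) (by rw [this]; simp)
        · intro a ha b hb hab
          rw [List.mem_singleton] at hb
          subst hb
          rcases List.mem_append.1 ha with ha | ha
          · exact absurd ((hinv a).2 ha) (by rw [hab, hv']; simp)
          · exact (hlinfo a ha).2 (by rw [hab])
      have hlenv : vis'.length = g.length := by rw [hlen']; exact hlen₁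
      rw [List.foldl_cons, hs]
      obtain ⟨c1, c2, c3, c4, c5, c6⟩ := ih vis' ((ord ++ l) ++ [i]) hlenv his' hinv' hnd'
      refine ⟨c1, c2, c3, ?_, ?_, ?_⟩
      · intro j hj
        rcases List.mem_cons.1 hj with rfl | hj
        · exact c5 j (by rw [hp' j]; simp)
        · exact c4 j hj
      · intro x hx
        exact c5 x (by rw [hp' x, hx]; simp)
      · obtain ⟨suf, hsuf⟩ := c6
        exact ⟨l ++ i :: suf, by rw [hsuf]; simp⟩

theorem gsScan (g : List (List Int)) (tv : List Int) (vis0 : List Bool) (root : Nat) :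
    ∀ is : List Nat, root ∈ is →
    tv.getD root 0 = (tv.length : Int) →
    (∀ i ∈ is, i ≠ root → tv.getD i 0 ≠ (tv.length : Int)) →
    gsFinalScan g tv vis0 is =
      (match gsDfsCheck g (g.length + 1) root vis0 with
       | none => none
       | some visC => some (gsAllVisited (List.range tv.length) visC)) := by
  intro is
  induction is with
  | nil => intro h; simp at h
  | cons i is ih =>
    intro hmem hroot hothers
    rcases eq_or_ne i root with rfl | hne
    · rw [gsFinalScan, if_pos hroot]
    · rw [gsFinalScan, if_neg (hothers i (List.mem_cons_self) hne)]
      exact ih ((List.mem_cons.1 hmem).resolve_left (Ne.symm hne)) hroot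
        (fun j hj => hothers j (List.mem_cons_of_mem _ hj))

theorem gsRepGetD (n : Nat) (x : Nat) : (List.replicate n false).getD x false = false := by
  by_cases hx : x < n
  · rw [List.getD_eq_getElem _ _ (by simpa using hx)]
    simp
  · rw [List.getD, List.getElem?_eq_none (by simpa using Nat.le_of_not_lt hx)]
    rfl

-- the common value both programs compute for a non-empty valid graph
theorem good_start_eq_aux (g : List (List Int)) (hg : gsValid g) (hne : g ≠ []) :
    good_start g = good_start_alt g := by
  have hnpos : 0 < g.length := List.length_pos_iff.2 hne
  have hlen0 : (List.replicate g.length false).length = g.length := by simp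
  obtain ⟨V, L, hfold1, hVlen, hfoldA⟩ := gsPhaseA g hg (List.range g.length)
    (List.replicate g.length false) ((List.replicate g.length (-1 : Int)).set 0 0) 0 [] hlen0
  simp only [List.nil_append] at hfold1
  obtain ⟨q1, q2, q3, q4, _, _⟩ := gsP1_inv g hg (List.range g.length)
    (List.replicate g.length false) [] hlen0 (fun i hi => List.mem_range.1 hi)
    (by intro x; rw [gsRepGetD]; simp) List.nodup_nil
  rw [hfold1] at q1 q2 q3 q4
  simp only at q1 q2 q3 q4
  -- L is a duplicate-free enumeration of all vertices
  have hsub : ∀ x ∈ L, x < g.length := by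
    intro x hx
    have := gsGetD_true_lt V x ((q2 x).2 hx)
    omega
  have hrange : ∀ i, i < g.length → i ∈ L :=
    fun i h => (q2 i).1 (q4 i (List.mem_range.2 h))
  have hLlen : L.length = g.length := by
    have hfin : L.toFinset = Finset.range g.length := by
      apply Finset.ext
      intro x
      simp only [List.mem_toFinset, Finset.mem_range]
      exact ⟨hsub x, hrange x⟩
    have := List.toFinset_card_of_nodup q3
    rw [hfin] at this
    simp at this
    omega
  have hLne : L ≠ [] := by
    intro h
    rw [h] at hLlen
    simp at hLlen
    omega
  -- the candidate root: last vertex in the finish order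
  set root := L.getLast hLne with hrootdef
  have hrootmem : root ∈ L := List.getLast_mem hLne
  have hrootlt : root < g.length := hsub _ hrootmem
  have hidx : L.idxOf root = g.length - 1 := by
    have h1 : root = L[L.length - 1] := List.getLast_eq_getElem hLne
    rw [h1, List.Nodup.idxOf_getElem q3 _ (by omega), hLlen]
  -- finish times
  have htv0len : ((List.replicate g.length (-1 : Int)).set 0 0).length = g.length := by simp
  have htvlen : (gsWriteT ((List.replicate g.length (-1 : Int)).set 0 0) 0 L).length = g.length := by
    rw [gsWriteT_length]; exact htv0len
  have hvalmem : ∀ i ∈ L,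
      (gsWriteT ((List.replicate g.length (-1 : Int)).set 0 0) 0 L).getD i 0
        = (L.idxOf i : Int) + 1 := by
    intro i hi
    rw [gsWriteT_getD_mem _ _ _ _ q3 hi (by rw [htv0len]; exact hsub i hi)]
    ring
  have hrootval : (gsWriteT ((List.replicate g.length (-1 : Int)).set 0 0) 0 L).getD root 0
      = (g.length : Int) := by
    rw [hvalmem root hrootmem, hidx]
    have : (1 : Nat) ≤ g.length := hnpos
    push_cast [this]
    ring
  have hothers : ∀ i ∈ List.range g.length, i ≠ root →
      (gsWriteT ((List.replicate g.length (-1 : Int)).set 0 0) 0 L).getD i 0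
        ≠ (g.length : Int) := by
    intro i hi hneq
    have hiL : i ∈ L := hrange i (List.mem_range.1 hi)
    rw [hvalmem i hiL]
    intro hcontra
    have hlt : L.idxOf i < L.length := List.idxOf_lt_length_of_mem hiL
    have hrl : L.idxOf root < L.length := List.idxOf_lt_length_of_mem hrootmem
    have h1 : L[L.idxOf i] = i := List.getElem_idxOf hlt
    have h2 : L[L.idxOf root] = root := List.getElem_idxOf hrl
    apply hneq
    rw [← h1, ← h2]
    congr 1
    omega
  -- the shared second pass: gsD from the root on a fresh visited array
  have hlenset : ((List.replicate g.length false).set root true).length = g.length := by simp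
  obtain ⟨visC, lC, hDC, hClen, _, _, _, _⟩ := gsD_spec g hg (gsNbrs g root)
    ((List.replicate g.length false).set root true) [] (gsValid_nbrs g hg root) hlenset
  have hCanon : gsLoopF g g.length (gsNbrs g root)
      ((List.replicate g.length false).set root true, []) = some (visC, [] ++ lC) := by
    rw [gsLoopF_canon g hg _ _ _ _ (gsValid_nbrs g hg root) hlenset
      (by have := gsCF_le_length ((List.replicate g.length false).set root true); omega), hDC]
  have hvisClen : visC.length = g.length := by rw [hClen]; exact hlenset
  -- A's check call computes visC
  have hcheck : gsDfsCheck g (g.length + 1) root (List.replicate g.length false) = some visC := by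
    rw [gsDfsCheck]
    rcases gsDfsCheckLoop_rel g g.length (gsNbrs g root)
        ((List.replicate g.length false).set root true) [] with ⟨_, hB⟩ | ⟨vC, l, hA, hB⟩
    · rw [hCanon] at hB; exact absurd hB (by simp)
    · rw [hCanon] at hB
      have hfst : vC = visC := (congrArg Prod.fst (Option.some.inj hB)).symm
      rw [hA, hfst]
  -- B's second pass computes visC as well
  have hidfs : gsIdfs g (List.replicate g.length false) root [] = some (visC, [] ++ lC ++ [root]) := by
    rw [gsIdfs]
    have hframes : ∀ p ∈ [((root : Nat), (0 : Nat))], p.1 < g.length ∧ p.2 ≤ (gsNbrs g p.1).length := by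
      intro p hp
      rcases List.mem_cons.1 hp with rfl | hp
      · exact ⟨hrootlt, Nat.zero_le _⟩
      · simp at hp
    have hdeg : (gsNbrs g root).length ≤ gsDmax g := gsNbrs_len_le g root
    have hcf : gsCF ((List.replicate g.length false).set root true) ≤ g.length := by
      have := gsCF_le_length ((List.replicate g.length false).set root true)
      omega
    have hmul : gsCF ((List.replicate g.length false).set root true) * (gsDmax g + 2)
        ≤ g.length * (gsDmax g + 2) := Nat.mul_le_mul_right _ hcf
    have hexp : (g.length + 1) * (gsDmax g + 2) = g.length * (gsDmax g + 2) + (gsDmax g + 2) := by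
      ring
    have hmu : gsMu g [(root, 0)] ((List.replicate g.length false).set root true) < gsFuelB g := by
      simp only [gsMu, List.map_cons, List.map_nil, List.sum_cons, List.sum_nil, gsFuelB]
      omega
    have hsome := gsRunB_suff g hg (gsFuelB g) [(root, 0)]
      ((List.replicate g.length false).set root true) [] hframes hlenset hmu
    rcases Option.isSome_iff_exists.1 hsome with ⟨out, hout⟩
    have hcor := gsRunB_correct g hg (gsFuelB g) [(root, 0)]
      ((List.replicate g.length false).set root true) [] out
      (fun p hp => (hframes p hp).1) hlenset hout
    rw [hout, hcor]
    simp only [gsStepAll, List.drop_zero, hDC]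
  -- now compute both sides
  have hA : good_start g = some (gsAllVisited (List.range g.length) visC) := by
    rw [good_start]
    rw [hfoldA]
    have hreset : (List.range g.length).foldl (fun v i => v.set i false) V
        = List.replicate g.length false := by
      have := gsReset V
      rw [hVlen, hlen0] at this
      exact this
    show gsFinalScan g (gsWriteT ((List.replicate g.length (-1 : Int)).set 0 0) 0 L)
        ((List.range g.length).foldl (fun v i => v.set i false) V) (List.range g.length)
      = some (gsAllVisited (List.range g.length) visC)
    rw [hreset]
    have hscan := gsScan g (gsWriteT ((List.replicate g.length (-1 : Int)).set 0 0) 0 L)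
      (List.replicate g.length false) root (List.range g.length)
      (List.mem_range.2 hrootlt) (by rw [htvlen]; exact hrootval)
      (by rw [htvlen]; exact hothers)
    rw [hscan, hcheck]
    simp [htvlen]
  have hB : good_start_alt g = some (visC.all id) := by
    rw [good_start_alt]
    rw [if_neg (by omega)]
    rw [gsPhaseB g hg (List.range g.length) (List.replicate g.length false) [] hlen0
      (fun i hi => List.mem_range.1 hi)]
    rw [hfold1]
    show (match L.getLast? with
      | none => none
      | some root =>
        match gsIdfs g (List.replicate g.length false) root [] with
        | none => none
        | some (seen, _) => some (seen.all id)) = some (visC.all id)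
    have hlast : L.getLast? = some root := List.getLast?_eq_some_getLast hLne
    rw [hlast]
    show (match gsIdfs g (List.replicate g.length false) root [] with
      | none => none
      | some (seen, _) => some (seen.all id)) = some (visC.all id)
    rw [hidfs]
  rw [hA, hB]
  congr 1
  rw [← hvisClen, gsAllVisited_range]

-- ===== VERDICT (by name: the statement is the Claim_ definition above) =====
theorem good_start_spec : Claim_equal_good_start := by
  unfold Claim_equal_good_start Spec_good_start
  intro g _ hpre
  obtain ⟨hne, hprev⟩ := hpre
  have hg : gsValid g := by
    intro row hrow v hv
    obtain ⟨h0, hlt⟩ := hprev row hrow v hv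
    refine ⟨h0, ?_⟩
    omega
  exact good_start_eq_aux g hg hne
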